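-- pv_equiv track=rewrite | github.com/navin1/work_agent | tools/composer_tools.py | _build_task_diagram
-- ===== SOURCE A (Python) =====
-- def _build_task_diagram(task_defs: dict) -> str:
--     """Build a simple ASCII tree of task dependencies."""
--     # Find roots (tasks with no upstream dependencies)
--     all_downstream = set()
--     for td in task_defs.values():
--         for d in td.get("downstream_task_ids", []):
--             all_downstream.add(d)
--
--     roots = [tid for tid in task_defs if tid not in all_downstream]
--
--     lines = []
--     visited = set()
--
--     def render(tid: str, prefix: str, is_last: bool):
--         if tid in visited:
--             lines.append(f"{prefix}{'└── ' if is_last else '├── '}{tid} (↑ see above)")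
--             return
--         visited.add(tid)
--         connector = "└── " if is_last else "├── "
--         lines.append(f"{prefix}{connector}{tid}")
--         children = task_defs.get(tid, {}).get("downstream_task_ids", [])
--         child_prefix = prefix + ("    " if is_last else "│   ")
--         for i, child in enumerate(children):
--             render(child, child_prefix, i == len(children) - 1)
--
--     for i, root in enumerate(roots):
--         lines.append(root)
--         children = task_defs.get(root, {}).get("downstream_task_ids", [])
--         for j, child in enumerate(children):
--             render(child, "", j == len(children) - 1)
--
--     return "\n".join(lines) if lines else "(no tasks)"
-- ===== SOURCE B (Python) =====
-- def _build_task_diagram(task_defs: dict) -> str: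
--     """Build a simple ASCII tree of task dependencies (iterative, explicit stack)."""
--     all_downstream = set()
--     for td in task_defs.values():
--         for d in td.get("downstream_task_ids", []):
--             all_downstream.add(d)
--
--     roots = [tid for tid in task_defs if tid not in all_downstream]
--
--     lines = []
--     visited = set()
--
--     for root in roots:
--         lines.append(root)
--         children = task_defs.get(root, {}).get("downstream_task_ids", [])
--         n = len(children)
--         stack = [(c, "", i == n - 1) for i, c in reversed(list(enumerate(children)))]
--         while stack:
--             tid, prefix, is_last = stack.pop()
--             connector = "└── " if is_last else "├── "
--             if tid in visited:
--                 lines.append(f"{prefix}{connector}{tid} (↑ see above)")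
--                 continue
--             visited.add(tid)
--             lines.append(f"{prefix}{connector}{tid}")
--             kids = task_defs.get(tid, {}).get("downstream_task_ids", [])
--             m = len(kids)
--             child_prefix = prefix + ("    " if is_last else "│   ")
--             for i, c in reversed(list(enumerate(kids))):
--                 stack.append((c, child_prefix, i == m - 1))
--     return "\n".join(lines) if lines else "(no tasks)"
-- ===== Notes on version B (the rewrite author's own statement) =====
-- stated objective: alternative
-- what changed: A's recursive render helper is replaced by an iterative DFS with an explicit LIFO stack of (tid, prefix, is_last) frames (children pushed in reverse so popping preserves the pre-order); root-finding and output format are unchanged.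
import Mathlib
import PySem

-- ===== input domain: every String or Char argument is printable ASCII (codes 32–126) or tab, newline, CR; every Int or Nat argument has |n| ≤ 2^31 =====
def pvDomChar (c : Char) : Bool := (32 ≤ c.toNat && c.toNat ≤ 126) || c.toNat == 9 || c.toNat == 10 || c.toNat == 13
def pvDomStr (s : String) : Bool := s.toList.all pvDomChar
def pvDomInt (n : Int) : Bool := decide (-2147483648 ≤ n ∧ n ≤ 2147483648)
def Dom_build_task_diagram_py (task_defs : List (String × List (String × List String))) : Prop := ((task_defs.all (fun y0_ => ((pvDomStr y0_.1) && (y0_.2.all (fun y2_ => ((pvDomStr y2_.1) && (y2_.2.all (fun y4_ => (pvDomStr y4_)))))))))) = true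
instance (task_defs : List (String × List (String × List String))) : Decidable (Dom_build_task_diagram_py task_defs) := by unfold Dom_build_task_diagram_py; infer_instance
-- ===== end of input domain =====

-- B replaces A's recursive `render` by an explicit LIFO stack of (tid, prefix, is_last) frames
-- (same root-finding, same output); objective: alternative decomposition, same cost.

-- ===== PORT A =====
-- shared helpers: both Pythons receive the same dict and compute roots/children identically
def pvDictOf (task_defs : List (String × List (String × List String))) :
    PySem.Dict String (PySem.Dict String (List String)) :=
  PySem.Dict.ofList (task_defs.map (fun p => (p.1, PySem.Dict.ofList p.2)))

-- task_defs.get(tid, {}).get("downstream_task_ids", [])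
def pvChildren (td : PySem.Dict String (PySem.Dict String (List String))) (tid : String) :
    List String :=
  PySem.Dict.getD (PySem.Dict.getD td tid PySem.Dict.empty) "downstream_task_ids" []

-- the all_downstream set (both Pythons build it with the same double loop)
def pvAllDown (td : PySem.Dict String (PySem.Dict String (List String))) : PySem.Set String :=
  td.values.foldl
    (fun s t => (PySem.Dict.getD t "downstream_task_ids" []).foldl PySem.Set.add s)
    PySem.Set.empty

-- all downstream ids with multiplicity; its length bounds every recursion depth / stack run
def pvUniv (td : PySem.Dict String (PySem.Dict String (List String))) : List String :=
  td.values.flatMap (fun t => PySem.Dict.getD t "downstream_task_ids" [])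

mutual
-- A's `render(tid, prefix, is_last)`; the Nat is a fuel guard for termination only
def pvRenderA (td : PySem.Dict String (PySem.Dict String (List String))) :
    Nat → PySem.Set String → String → String → Bool → (List String × PySem.Set String)
  | 0, v, _, _, _ => ([], v)   -- out of fuel: unreachable for the fuel the port passes
  | f+1, v, tid, pfx, islast =>
    if PySem.Set.contains v tid then
      ([pfx ++ (if islast then "└── " else "├── ") ++ tid ++ " (↑ see above)"], v)
    else
      let v1 := PySem.Set.add v tid
      let connector := if islast then "└── " else "├── "
      let line := pfx ++ connector ++ tid
      let kids := pvChildren td tid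
      let childPrefix := pfx ++ (if islast then "    " else "│   ")
      let r := pvChildLoopA td f v1 childPrefix (PySem.List.enumerate kids) (kids.length : Int)
      (line :: r.1, r.2)
  termination_by f _ _ _ _ => (f, 0)

-- A's `for i, child in enumerate(children): render(child, child_prefix, i == len(children)-1)`
def pvChildLoopA (td : PySem.Dict String (PySem.Dict String (List String))) :
    Nat → PySem.Set String → String → List (Int × String) → Int → (List String × PySem.Set String)
  | _, v, _, [], _ => ([], v)
  | f, v, cp, (i, c) :: rest, n =>
    let r1 := pvRenderA td f v c cp (i == n - 1)
    let r2 := pvChildLoopA td f r1.2 cp rest n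
    (r1.1 ++ r2.1, r2.2)
  termination_by f _ _ l _ => (f, l.length + 1)
end

-- A's outer `for i, root in enumerate(roots)` loop (threads lines and visited)
def pvRootLoopA (td : PySem.Dict String (PySem.Dict String (List String))) (fuel : Nat) :
    PySem.Set String → List String → (List String × PySem.Set String)
  | v, [] => ([], v)
  | v, root :: rest =>
    let kids := pvChildren td root
    let r1 := pvChildLoopA td fuel v "" (PySem.List.enumerate kids) (kids.length : Int)
    let r2 := pvRootLoopA td fuel r1.2 rest
    (root :: (r1.1 ++ r2.1), r2.2)

def build_task_diagram_py (task_defs : List (String × List (String × List String))) : String :=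
  let td := pvDictOf task_defs
  let allDown := pvAllDown td
  let roots := td.keys.filter (fun tid => !(PySem.Set.contains allDown tid))
  let fuel := (pvUniv td).length + 1   -- depth guard; the proofs show it is never exhausted
  let r := pvRootLoopA td fuel PySem.Set.empty roots
  if r.1.isEmpty then "(no tasks)" else PySem.Str.join "\n" r.1

-- ===== PORT B =====
-- the stack frames B pushes for the children of one node (B pushes them reversed onto a
-- LIFO stack, so with the stack's top at the head they sit in list order at the front)
def pvFrames (cp : String) (kids : List String) : List (String × String × Bool) :=
  (PySem.List.enumerate kids).map (fun ic => (ic.2, cp, ic.1 == (kids.length : Int) - 1))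

-- B's `while stack:` loop; the Nat is a fuel guard for termination only
def pvStackB (td : PySem.Dict String (PySem.Dict String (List String))) :
    Nat → PySem.Set String → List (String × String × Bool) → (List String × PySem.Set String)
  | 0, v, _ => ([], v)   -- out of fuel: unreachable for the fuel the port passes
  | _+1, v, [] => ([], v)
  | f+1, v, (tid, pfx, islast) :: rest =>
    let connector := if islast then "└── " else "├── "
    if PySem.Set.contains v tid then
      let r := pvStackB td f v rest
      ((pfx ++ connector ++ tid ++ " (↑ see above)") :: r.1, r.2)
    else
      let v1 := PySem.Set.add v tid
      let line := pfx ++ connector ++ tid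
      let kids := pvChildren td tid
      let cp := pfx ++ (if islast then "    " else "│   ")
      let r := pvStackB td f v1 (pvFrames cp kids ++ rest)
      (line :: r.1, r.2)

-- B's outer `for root in roots:` loop
def pvRootLoopB (td : PySem.Dict String (PySem.Dict String (List String))) (fuel : Nat) :
    PySem.Set String → List String → (List String × PySem.Set String)
  | v, [] => ([], v)
  | v, root :: rest =>
    let r1 := pvStackB td fuel v (pvFrames "" (pvChildren td root))
    let r2 := pvRootLoopB td fuel r1.2 rest
    (root :: (r1.1 ++ r2.1), r2.2)

def build_task_diagram_py_alt (task_defs : List (String × List (String × List String))) : String :=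
  let td := pvDictOf task_defs
  let allDown := pvAllDown td
  let roots := td.keys.filter (fun tid => !(PySem.Set.contains allDown tid))
  let s := (pvUniv td).length
  let r := pvRootLoopB td ((s+1)*(s+1)) PySem.Set.empty roots   -- pop-count guard; never exhausted
  if r.1.isEmpty then "(no tasks)" else PySem.Str.join "\n" r.1

-- ===== PRECONDITION & SPEC =====
def Spec_build_task_diagram_py (task_defs : List (String × List (String × List String))) (out : String) : Prop := out = build_task_diagram_py_alt task_defs
instance (task_defs : List (String × List (String × List String))) (out : String) : Decidable (Spec_build_task_diagram_py task_defs out) := by unfold Spec_build_task_diagram_py; infer_instance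

-- ===== CLAIM (what is proved, stated in full; the proofs are below) =====
def Claim_equal_build_task_diagram_py : Prop := ∀ (task_defs : List (String × List (String × List String))), Dom_build_task_diagram_py task_defs → Spec_build_task_diagram_py task_defs (build_task_diagram_py task_defs)

-- ===== LEMMAS AND PROOFS =====

-- number of not-yet-visited downstream occurrences: the decreasing potential
def pvUnvis (td : PySem.Dict String (PySem.Dict String (List String)))
    (v : PySem.Set String) : Nat :=
  ((pvUniv td).filter (fun x => !(PySem.Set.contains v x))).length

theorem pvUnvis_le (td : PySem.Dict String (PySem.Dict String (List String)))
    (v : PySem.Set String) : pvUnvis td v ≤ (pvUniv td).length :=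
  List.length_filter_le _ _

theorem pvUnvis_mono (td : PySem.Dict String (PySem.Dict String (List String)))
    {v v' : PySem.Set String} (h : ∀ x, x ∈ v → x ∈ v') :
    pvUnvis td v' ≤ pvUnvis td v := by
  apply List.Sublist.length_le
  apply List.monotone_filter_right
  intro a ha
  simp only [Bool.not_eq_true', ← Bool.not_eq_true, PySem.Set.contains_iff] at ha ⊢
  exact fun hm => ha (h a hm)

theorem pvUnvis_add_lt (td : PySem.Dict String (PySem.Dict String (List String)))
    {v : PySem.Set String} {tid : String}
    (htid : tid ∈ pvUniv td) (hc : tid ∉ v) :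
    pvUnvis td (PySem.Set.add v tid) < pvUnvis td v := by
  have hsub : ((pvUniv td).filter (fun x => !(PySem.Set.contains (PySem.Set.add v tid) x))).Sublist
      ((pvUniv td).filter (fun x => !(PySem.Set.contains v x))) := by
    apply List.monotone_filter_right
    intro a ha
    simp only [Bool.not_eq_true', ← Bool.not_eq_true, PySem.Set.contains_iff] at ha ⊢
    intro hm
    exact ha (by simp [PySem.Set.mem_add, hm])
  have hne : ((pvUniv td).filter (fun x => !(PySem.Set.contains (PySem.Set.add v tid) x))) ≠
      ((pvUniv td).filter (fun x => !(PySem.Set.contains v x))) := by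
    intro heq
    have h1 : tid ∈ (pvUniv td).filter (fun x => !(PySem.Set.contains v x)) := by
      simp only [List.mem_filter, Bool.not_eq_true', ← Bool.not_eq_true, PySem.Set.contains_iff]
      exact ⟨htid, hc⟩
    rw [← heq] at h1
    simp only [List.mem_filter, Bool.not_eq_true', ← Bool.not_eq_true, PySem.Set.contains_iff] at h1
    exact h1.2 (by simp [PySem.Set.mem_add])
  exact Nat.lt_of_le_of_ne hsub.length_le (fun hl => hne (hsub.eq_of_length hl))

theorem pvGet?_mem_values {κ ν : Type} [BEq κ] (d : PySem.Dict κ ν) (k : κ) (t : ν)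
    (h : PySem.Dict.get? d k = some t) : t ∈ d.values := by
  unfold PySem.Dict.get? at h
  obtain ⟨p, hp, hpe⟩ := Option.map_eq_some_iff.mp h
  exact hpe ▸ List.mem_map_of_mem (List.mem_of_find?_eq_some hp)

theorem pvSublist_flatMap {α β : Type} (f : α → List β) {t : α} {l : List α} (h : t ∈ l) :
    (f t).Sublist (l.flatMap f) := by
  induction l with
  | nil => cases h
  | cons a l ih =>
      rcases List.mem_cons.mp h with h1 | h1
      · subst h1; simp only [List.flatMap_cons]; exact List.sublist_append_left _ _
      · simpa using (ih h1).trans (List.sublist_append_right _ _)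

-- every child list is a sublist of pvUniv
theorem pvChildren_sublist (td : PySem.Dict String (PySem.Dict String (List String)))
    (tid : String) : (pvChildren td tid).Sublist (pvUniv td) := by
  cases hg : PySem.Dict.get? td tid with
  | none =>
      have h0 : pvChildren td tid = [] := by
        simp only [pvChildren, PySem.Dict.getD, hg, Option.getD_none]
        simp [PySem.Dict.get?, PySem.Dict.empty]
      simp [h0]
  | some t =>
      have h1 : pvChildren td tid = PySem.Dict.getD t "downstream_task_ids" [] := by
        simp only [pvChildren, PySem.Dict.getD, hg, Option.getD_some]
      rw [h1]
      unfold pvUniv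
      exact pvSublist_flatMap (fun t => PySem.Dict.getD t "downstream_task_ids" [])
        (pvGet?_mem_values td tid t hg)

theorem pvChildren_mem (td : PySem.Dict String (PySem.Dict String (List String)))
    {tid x : String} (hx : x ∈ pvChildren td tid) : x ∈ pvUniv td :=
  (pvChildren_sublist td tid).mem hx

theorem pvChildren_len (td : PySem.Dict String (PySem.Dict String (List String)))
    (tid : String) : (pvChildren td tid).length ≤ (pvUniv td).length :=
  (pvChildren_sublist td tid).length_le

theorem pvEnumerate_snd_mem {α : Type} {xs : List α} :
    ∀ {start : Int} {p : Int × α}, p ∈ PySem.List.enumerate xs start → p.2 ∈ xs := by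
  induction xs with
  | nil => intro start p h; simp [PySem.List.enumerate] at h
  | cons a l ih =>
      intro start p h
      simp only [PySem.List.enumerate, List.mem_cons] at h
      rcases h with h | h
      · subst h; exact List.mem_cons_self
      · exact List.mem_cons_of_mem _ (ih h)

-- the visited set only grows through render / the child loop
theorem pvMonoA (td : PySem.Dict String (PySem.Dict String (List String))) :
    ∀ f : Nat,
      (∀ v tid pfx il x, x ∈ v → x ∈ (pvRenderA td f v tid pfx il).2) ∧
      (∀ frames v cp nn x, x ∈ v → x ∈ (pvChildLoopA td f v cp frames nn).2) := by
  intro f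
  induction f with
  | zero =>
      constructor
      · intro v tid pfx il x hx; simpa [pvRenderA] using hx
      · intro frames
        induction frames with
        | nil => intro v cp nn x hx; simpa [pvChildLoopA] using hx
        | cons p rest ih =>
            intro v cp nn x hx
            obtain ⟨i, c⟩ := p
            simp only [pvChildLoopA]
            exact ih _ _ _ _ (by simpa [pvRenderA] using hx)
  | succ f ihf =>
      have hR : ∀ v tid pfx il x, x ∈ v → x ∈ (pvRenderA td (f+1) v tid pfx il).2 := by
        intro v tid pfx il x hx
        by_cases hc : tid ∈ v
        · simp [pvRenderA, hc, hx]
        · simp only [pvRenderA]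
          rw [if_neg (by simpa [PySem.Set.contains_iff] using hc)]
          exact ihf.2 _ _ _ _ _ (by simp [PySem.Set.mem_add, hx])
      refine ⟨hR, ?_⟩
      intro frames
      induction frames with
      | nil => intro v cp nn x hx; simpa [pvChildLoopA] using hx
      | cons p rest ih =>
          intro v cp nn x hx
          obtain ⟨i, c⟩ := p
          simp only [pvChildLoopA]
          exact ih _ _ _ _ (hR _ _ _ _ _ hx)

-- stabilization: with enough fuel, the exact fuel does not matter
theorem pvStabR (td : PySem.Dict String (PySem.Dict String (List String))) :
    ∀ n f f' v tid pfx il, pvUnvis td v ≤ n → n < f → n < f' → tid ∈ pvUniv td →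
      pvRenderA td f v tid pfx il = pvRenderA td f' v tid pfx il := by
  intro n
  induction n using Nat.strong_induction_on with
  | _ n IH =>
      intro f f' v tid pfx il hn hf hf' htid
      obtain ⟨g, rfl⟩ : ∃ g, f = g + 1 := ⟨f - 1, by omega⟩
      obtain ⟨g', rfl⟩ : ∃ g', f' = g' + 1 := ⟨f' - 1, by omega⟩
      by_cases hc : tid ∈ v
      · simp [pvRenderA, hc]
      · have hlt : pvUnvis td (PySem.Set.add v tid) < pvUnvis td v := pvUnvis_add_lt td htid hc
        obtain ⟨m, rfl⟩ : ∃ m, n = m + 1 := ⟨n - 1, by omega⟩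
        have hm : pvUnvis td (PySem.Set.add v tid) ≤ m := by omega
        have key : ∀ (frames : List (Int × String)) (v' : PySem.Set String) (cp : String) (nn : Int),
            pvUnvis td v' ≤ m → (∀ p ∈ frames, p.2 ∈ pvUniv td) →
            pvChildLoopA td g v' cp frames nn = pvChildLoopA td g' v' cp frames nn := by
          intro frames
          induction frames with
          | nil => intro v' cp nn _ _; simp [pvChildLoopA]
          | cons p rest ih =>
              intro v' cp nn hv' hmem
              obtain ⟨i, c⟩ := p
              have hc' : c ∈ pvUniv td := hmem (i, c) List.mem_cons_self
              have h1 : pvRenderA td g v' c cp (i == nn - 1) =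
                  pvRenderA td g' v' c cp (i == nn - 1) :=
                IH m (by omega) g g' v' c cp (i == nn - 1) hv' (by omega) (by omega) hc'
              simp only [pvChildLoopA, h1]
              have hv2 : pvUnvis td (pvRenderA td g' v' c cp (i == nn - 1)).2 ≤ m :=
                le_trans (pvUnvis_mono td (fun x hx => (pvMonoA td g').1 v' c cp (i == nn - 1) x hx)) hv'
              rw [ih _ _ _ hv2 (fun q hq => hmem q (List.mem_cons_of_mem _ hq))]
        have hkey := key (PySem.List.enumerate (pvChildren td tid)) (PySem.Set.add v tid)
          (pfx ++ (if il then "    " else "│   ")) ((pvChildren td tid).length : Int) hm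
          (fun p hp => pvChildren_mem td (pvEnumerate_snd_mem hp))
        have hcb : PySem.Set.contains v tid = false := by
          simpa [PySem.Set.contains_iff] using hc
        simp only [pvRenderA, hcb, Bool.false_eq_true, if_false, hkey]

-- list-level stabilization, standalone
theorem pvStabK (td : PySem.Dict String (PySem.Dict String (List String)))
    {n f f' : Nat} (hf : n < f) (hf' : n < f') :
    ∀ (frames : List (Int × String)) (v : PySem.Set String) (cp : String) (nn : Int),
      pvUnvis td v ≤ n → (∀ p ∈ frames, p.2 ∈ pvUniv td) →
      pvChildLoopA td f v cp frames nn = pvChildLoopA td f' v cp frames nn := by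
  intro frames
  induction frames with
  | nil => intro v cp nn _ _; simp [pvChildLoopA]
  | cons p rest ih =>
      intro v cp nn hv hmem
      obtain ⟨i, c⟩ := p
      have hc' : c ∈ pvUniv td := hmem (i, c) List.mem_cons_self
      have h1 : pvRenderA td f v c cp (i == nn - 1) = pvRenderA td f' v c cp (i == nn - 1) :=
        pvStabR td n f f' v c cp (i == nn - 1) hv hf hf' hc'
      simp only [pvChildLoopA, h1]
      have hv2 : pvUnvis td (pvRenderA td f' v c cp (i == nn - 1)).2 ≤ n :=
        le_trans (pvUnvis_mono td (fun x hx => (pvMonoA td f').1 v c cp (i == nn - 1) x hx)) hv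
      rw [ih _ _ _ hv2 (fun q hq => hmem q (List.mem_cons_of_mem _ hq))]

-- sequential rendering of a list of explicit frames with the canonical fuel
def pvSeq (td : PySem.Dict String (PySem.Dict String (List String))) :
    PySem.Set String → List (String × String × Bool) → (List String × PySem.Set String)
  | v, [] => ([], v)
  | v, (tid, pfx, il) :: rest =>
    let r1 := pvRenderA td ((pvUniv td).length + 1) v tid pfx il
    let r2 := pvSeq td r1.2 rest
    (r1.1 ++ r2.1, r2.2)

theorem pvSeq_append (td : PySem.Dict String (PySem.Dict String (List String)))
    (xs : List (String × String × Bool)) :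
    ∀ (ys : List (String × String × Bool)) (v : PySem.Set String),
      pvSeq td v (xs ++ ys) =
      ((pvSeq td v xs).1 ++ (pvSeq td (pvSeq td v xs).2 ys).1,
       (pvSeq td (pvSeq td v xs).2 ys).2) := by
  induction xs with
  | nil => intro ys v; simp [pvSeq]
  | cons p rest ih =>
      intro ys v
      obtain ⟨tid, pfx, il⟩ := p
      simp [pvSeq, ih]

-- the frames of one child list, rendered sequentially, are A's child loop
theorem pvSeq_frames (td : PySem.Dict String (PySem.Dict String (List String)))
    (en : List (Int × String)) :
    ∀ (v : PySem.Set String) (cp : String) (nn : Int),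
      pvSeq td v (en.map (fun ic => (ic.2, cp, ic.1 == nn - 1))) =
      pvChildLoopA td ((pvUniv td).length + 1) v cp en nn := by
  induction en with
  | nil => intro v cp nn; simp [pvSeq, pvChildLoopA]
  | cons p rest ih =>
      intro v cp nn
      obtain ⟨i, c⟩ := p
      simp [pvSeq, pvChildLoopA, ih]

theorem pvFrames_fst_mem {cp : String} {kids : List String} {p : String × String × Bool}
    (hp : p ∈ pvFrames cp kids) : p.1 ∈ kids := by
  unfold pvFrames at hp
  obtain ⟨ic, hic, rfl⟩ := List.mem_map.mp hp
  exact pvEnumerate_snd_mem hic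

-- B's stack run computes the sequential rendering (given enough fuel)
theorem pvStackEq (td : PySem.Dict String (PySem.Dict String (List String))) :
    ∀ (sf : Nat) (v : PySem.Set String) (frames : List (String × String × Bool)),
      frames.length + ((pvUniv td).length + 1) * pvUnvis td v < sf →
      (∀ p ∈ frames, p.1 ∈ pvUniv td) →
      pvStackB td sf v frames = pvSeq td v frames := by
  intro sf
  induction sf with
  | zero => intro v frames h _; omega
  | succ k ih =>
      intro v frames h hmem
      cases frames with
      | nil => simp [pvStackB, pvSeq]
      | cons p rest =>
          obtain ⟨tid, pfx, il⟩ := p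
          have htid : tid ∈ pvUniv td := hmem (tid, pfx, il) List.mem_cons_self
          by_cases hc : tid ∈ v
          · have hcb : PySem.Set.contains v tid = true := by
              simpa [PySem.Set.contains_iff] using hc
            have hrest : pvStackB td k v rest = pvSeq td v rest := by
              refine ih v rest (by simp at h; omega) ?_
              intro q hq; exact hmem q (List.mem_cons_of_mem _ hq)
            simp only [pvStackB, pvSeq, pvRenderA, hcb, if_true, hrest, List.singleton_append]
          · have hcb : PySem.Set.contains v tid = false := by
              simpa [PySem.Set.contains_iff] using hc
            have hlt : pvUnvis td (PySem.Set.add v tid) < pvUnvis td v :=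
              pvUnvis_add_lt td htid hc
            have hle : pvUnvis td v ≤ (pvUniv td).length := pvUnvis_le td v
            have hkl : (pvChildren td tid).length ≤ (pvUniv td).length := pvChildren_len td tid
            have hlen : ∀ cp', (pvFrames cp' (pvChildren td tid)).length =
                (pvChildren td tid).length := by
              intro cp'; simp [pvFrames]
            -- fuel accounting for the recursive stack step
            have harith : (pvFrames (pfx ++ (if il then "    " else "│   "))
                  (pvChildren td tid) ++ rest).length +
                ((pvUniv td).length + 1) * pvUnvis td (PySem.Set.add v tid) < k := by
              rw [List.length_append, hlen]
              have h2 : ((pvUniv td).length + 1) * (pvUnvis td (PySem.Set.add v tid) + 1) ≤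
                  ((pvUniv td).length + 1) * pvUnvis td v :=
                Nat.mul_le_mul_left _ (by omega)
              rw [Nat.mul_add, Nat.mul_one] at h2
              simp only [List.length_cons] at h
              generalize hP1 : ((pvUniv td).length + 1) * pvUnvis td (PySem.Set.add v tid) = P1 at h2 ⊢
              generalize hP2 : ((pvUniv td).length + 1) * pvUnvis td v = P2 at h2 h
              omega
            have hIH := ih (PySem.Set.add v tid)
              (pvFrames (pfx ++ (if il then "    " else "│   ")) (pvChildren td tid) ++ rest)
              harith
              (by
                intro q hq
                rcases List.mem_append.mp hq with hq | hq
                · exact pvChildren_mem td (pvFrames_fst_mem hq)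
                · exact hmem q (List.mem_cons_of_mem _ hq))
            have hseq := pvSeq_append td
              (pvFrames (pfx ++ (if il then "    " else "│   ")) (pvChildren td tid)) rest
              (PySem.Set.add v tid)
            have hfr : pvSeq td (PySem.Set.add v tid)
                (pvFrames (pfx ++ (if il then "    " else "│   ")) (pvChildren td tid)) =
                pvChildLoopA td ((pvUniv td).length + 1) (PySem.Set.add v tid)
                  (pfx ++ (if il then "    " else "│   "))
                  (PySem.List.enumerate (pvChildren td tid)) ((pvChildren td tid).length : Int) := by
              unfold pvFrames
              exact pvSeq_frames td _ _ _ _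
            have hst : pvChildLoopA td ((pvUniv td).length + 1) (PySem.Set.add v tid)
                  (pfx ++ (if il then "    " else "│   "))
                  (PySem.List.enumerate (pvChildren td tid)) ((pvChildren td tid).length : Int) =
                pvChildLoopA td ((pvUniv td).length) (PySem.Set.add v tid)
                  (pfx ++ (if il then "    " else "│   "))
                  (PySem.List.enumerate (pvChildren td tid)) ((pvChildren td tid).length : Int) := by
              refine pvStabK td (n := pvUnvis td (PySem.Set.add v tid)) (by omega) (by omega) _ _ _ _
                le_rfl ?_
              intro q hq
              exact pvChildren_mem td (pvEnumerate_snd_mem hq)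
            simp only [pvStackB, pvSeq, pvRenderA, hcb, Bool.false_eq_true, if_false,
              hIH, hseq, hfr, hst, List.cons_append]

-- the two outer root loops agree
theorem pvRootsEq (td : PySem.Dict String (PySem.Dict String (List String))) :
    ∀ (roots : List String) (v : PySem.Set String),
      pvRootLoopB td (((pvUniv td).length + 1) * ((pvUniv td).length + 1)) v roots =
      pvRootLoopA td ((pvUniv td).length + 1) v roots := by
  intro roots
  induction roots with
  | nil => intro v; simp [pvRootLoopA, pvRootLoopB]
  | cons root rest ih =>
      intro v
      have hle : pvUnvis td v ≤ (pvUniv td).length := pvUnvis_le td v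
      have hkl : (pvChildren td root).length ≤ (pvUniv td).length := pvChildren_len td root
      have harith : (pvFrames "" (pvChildren td root)).length +
          ((pvUniv td).length + 1) * pvUnvis td v <
          ((pvUniv td).length + 1) * ((pvUniv td).length + 1) := by
        have h1 : (pvFrames "" (pvChildren td root)).length = (pvChildren td root).length := by
          simp [pvFrames]
        rw [h1]
        have h2 : ((pvUniv td).length + 1) * pvUnvis td v ≤
            ((pvUniv td).length + 1) * (pvUniv td).length :=
          Nat.mul_le_mul_left _ hle
        have h3 : ((pvUniv td).length + 1) * ((pvUniv td).length + 1) =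
            ((pvUniv td).length + 1) * (pvUniv td).length + ((pvUniv td).length + 1) := by
          rw [Nat.mul_add, Nat.mul_one]
        generalize hP1 : ((pvUniv td).length + 1) * pvUnvis td v = P1 at h2
        generalize hP2 : ((pvUniv td).length + 1) * (pvUniv td).length = P2 at h2 h3
        omega
      have hstack := pvStackEq td (((pvUniv td).length + 1) * ((pvUniv td).length + 1)) v
        (pvFrames "" (pvChildren td root)) harith
        (fun q hq => pvChildren_mem td (pvFrames_fst_mem hq))
      have hfr : pvSeq td v (pvFrames "" (pvChildren td root)) =
          pvChildLoopA td ((pvUniv td).length + 1) v ""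
            (PySem.List.enumerate (pvChildren td root)) ((pvChildren td root).length : Int) := by
        unfold pvFrames
        exact pvSeq_frames td _ _ _ _
      simp only [pvRootLoopA, pvRootLoopB, hstack, hfr, ih]

-- ===== VERDICT (by name: the statement is the Claim_ definition above) =====
theorem build_task_diagram_py_spec : Claim_equal_build_task_diagram_py := by
  intro task_defs _
  unfold Spec_build_task_diagram_py build_task_diagram_py build_task_diagram_py_alt
  simp only [pvRootsEq]
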